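-- pv_equiv track=rewrite | github.com/briceshun/crisis-forecast | src/utils.py | createIdStr
-- ===== SOURCE A (Python) =====
-- def createIdStr(
--     vidId: list,
--     maxLen: int = 600
-- ):
--     output = []
--     # Iterate over ids step by maxLen/concatLen + 1
--     # where concatLen = 11 + 1 (id length + comma)
--     n = round(maxLen/12)
--     for i in range(0, len(vidId), n):
--         # If last id
--         if i == len(vidId):
--             output.append(vidId[i])
--         # Last batch of ids
--         elif i + n > len(vidId):
--             output.append(','.join(vidId[i:]))
--         # Concat normally for others
--         else:
--             output.append(','.join(vidId[i:i+n]))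
--     return output
-- ===== SOURCE B (Python) =====
-- def createIdStr(
--     vidId: list,
--     maxLen: int = 600
-- ):
--     # Single element-wise pass with a buffer, flushed every n ids;
--     # a non-positive batch size means there is nothing to batch.
--     n = round(maxLen/12)
--     if n <= 0:
--         return []
--     output = []
--     buf = []
--     for v in vidId:
--         buf.append(v)
--         if len(buf) == n:
--             output.append(','.join(buf))
--             buf = []
--     if buf:
--         output.append(','.join(buf))
--     return output
-- ===== Notes on version B (the rewrite author's own statement) =====
-- stated objective: alternative
-- what changed: Replaces A's stepped range(0,len,n) with slice arithmetic and a three-way branch by a single element-wise pass that fills a buffer and flushes a comma-joined batch each time the buffer reaches n, with a final flush of any remainder.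
import Mathlib
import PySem

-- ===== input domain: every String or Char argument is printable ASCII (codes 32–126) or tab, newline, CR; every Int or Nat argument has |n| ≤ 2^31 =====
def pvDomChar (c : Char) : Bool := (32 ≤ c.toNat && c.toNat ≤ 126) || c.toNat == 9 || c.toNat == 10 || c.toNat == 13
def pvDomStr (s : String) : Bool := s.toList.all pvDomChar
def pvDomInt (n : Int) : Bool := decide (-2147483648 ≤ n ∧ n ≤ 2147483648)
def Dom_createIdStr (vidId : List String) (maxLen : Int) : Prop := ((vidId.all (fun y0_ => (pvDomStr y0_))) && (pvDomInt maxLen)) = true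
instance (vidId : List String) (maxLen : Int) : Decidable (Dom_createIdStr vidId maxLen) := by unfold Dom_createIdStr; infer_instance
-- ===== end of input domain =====

-- B replaces A's stepped range(0,len,n) slicing loop with a single element-wise pass that
-- fills a buffer and flushes a comma-joined batch whenever it reaches n (objective: alternative).

-- ===== PORT A =====
-- round(m/12): banker's rounding of the rational m/12; exact on |m| ≤ 2^31
-- (the float quotient is close enough that ties and comparisons agree with the rational).
def pyRound12 (m : Int) : Int :=
  let q := PySem.Int.floordiv m 12
  let r := PySem.Int.mod m 12
  if r < 6 then q else if r > 6 then q + 1 else if q % 2 = 0 then q else q + 1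

def createIdStr (vidId : List String) (maxLen : Int) : List String :=
  let n : Int := pyRound12 maxLen
  (PySem.List.pyRange 0 (vidId.length : Int) n).foldl
    (fun output i =>
      if i = (vidId.length : Int) then
        -- unreachable branch of A (i < len inside the range); vidId[i] would raise IndexError
        output ++ [(PySem.List.pyGet? vidId i).getD ""]
      else if i + n > (vidId.length : Int) then
        output ++ [PySem.Str.join "," (PySem.List.slice vidId (some i) none)]
      else
        output ++ [PySem.Str.join "," (PySem.List.slice vidId (some i) (some (i + n)))])
    []

-- ===== PORT B =====
def createIdStr_alt (vidId : List String) (maxLen : Int) : List String :=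
  let n : Int := pyRound12 maxLen
  if n ≤ 0 then []
  else
    let s := vidId.foldl
      (fun (s : List String × List String) v =>
        let buf := s.2 ++ [v]
        if (buf.length : Int) = n then (s.1 ++ [PySem.Str.join "," buf], ([] : List String))
        else (s.1, buf))
      ([], [])
    if s.2 ≠ [] then s.1 ++ [PySem.Str.join "," s.2] else s.1

-- ===== PRECONDITION & SPEC =====
-- Pre_ excludes only -6 ≤ maxLen ≤ 6, where the batch size round(maxLen/12) is 0 and A raises
-- ValueError (range() with zero step); B's guard yields no batches there.
def Pre_createIdStr (vidId : List String) (maxLen : Int) : Prop := maxLen ≤ -7 ∨ 7 ≤ maxLen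
instance (vidId : List String) (maxLen : Int) : Decidable (Pre_createIdStr vidId maxLen) := by unfold Pre_createIdStr; infer_instance
def pvWitness_createIdStr : List String × Int := (["abcdefghijk", "qrstuvwxyz0", "ABCDEFGHIJ1"], 24)

def Spec_createIdStr (vidId : List String) (maxLen : Int) (out : List String) : Prop := out = createIdStr_alt vidId maxLen
instance (vidId : List String) (maxLen : Int) (out : List String) : Decidable (Spec_createIdStr vidId maxLen out) := by unfold Spec_createIdStr; infer_instance

-- ===== CLAIM (what is proved, stated in full; the proofs are below) =====
def Claim_equal_createIdStr : Prop := ∀ (vidId : List String) (maxLen : Int), Dom_createIdStr vidId maxLen → Pre_createIdStr vidId maxLen → Spec_createIdStr vidId maxLen (createIdStr vidId maxLen)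

-- ===== LEMMAS AND PROOFS =====

-- common characterisation: the list of ','-joins of the N-element chunks of l
def chunksJ (N : Nat) : List String → List String
  | [] => []
  | x :: xs => PySem.Str.join "," (x :: xs.take (N - 1)) :: chunksJ N (xs.drop (N - 1))
termination_by l => l.length
decreasing_by simp

lemma chunksJ_nil (N : Nat) : chunksJ N [] = [] := by unfold chunksJ; rfl

lemma chunksJ_cons (N : Nat) (x : String) (xs : List String) :
    chunksJ N (x :: xs)
      = PySem.Str.join "," (x :: xs.take (N - 1)) :: chunksJ N (xs.drop (N - 1)) := by
  conv_lhs => unfold chunksJ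

lemma pyRound12_pos (m : Int) (hm : 7 ≤ m) : 1 ≤ pyRound12 m := by
  unfold pyRound12
  simp only [PySem.Int.floordiv, PySem.Int.mod, Int.fdiv_eq_ediv, Int.fmod_eq_emod]
  split_ifs <;> omega

lemma pyRound12_neg (m : Int) (hm : m ≤ -7) : pyRound12 m ≤ -1 := by
  unfold pyRound12
  simp only [PySem.Int.floordiv, PySem.Int.mod, Int.fdiv_eq_ediv, Int.fmod_eq_emod]
  split_ifs <;> omega

lemma pyRange_cons_of_pos (a b : Int) {s : Int} (hs : 0 < s) (hab : a < b) :
    PySem.List.pyRange a b s = a :: PySem.List.pyRange (a + s) b s := by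
  rw [PySem.List.pyRange_of_pos _ _ hs, PySem.List.pyRange_of_pos _ _ hs]
  have h0 : 0 ≤ (b - a - 1) / s := Int.ediv_nonneg (by omega) (by omega)
  have hcount : ((if a < b then ((b - a + s - 1) / s).toNat else 0))
      = (if a + s < b then ((b - (a + s) + s - 1) / s).toNat else 0) + 1 := by
    have key : (b - a + s - 1) / s = (b - a - 1) / s + 1 := by
      have : b - a + s - 1 = (b - a - 1) + 1 * s := by ring
      rw [this, Int.add_mul_ediv_right _ _ (by omega : s ≠ 0)]
    by_cases h2 : a + s < b
    · simp only [if_pos hab, if_pos h2]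
      have : b - (a + s) + s - 1 = b - a - 1 := by ring
      rw [this, key]; omega
    · simp only [if_pos hab, if_neg h2]
      have hz : (b - a - 1) / s = 0 :=
        Int.ediv_eq_zero_of_lt (by omega) (by omega)
      rw [key, hz]
      rfl
  rw [hcount, List.range_succ_eq_map, List.map_cons, List.map_map]
  have h1 : a + s * ((0 : Nat) : Int) = a := by push_cast; ring
  rw [h1]
  congr 1
  apply List.map_congr_left
  intro k _
  simp only [Function.comp]
  push_cast
  ring

lemma foldA (full : List String) (n : Int) (hn : 1 ≤ n) :
    ∀ (d : Nat) (i : Int), 0 ≤ i → (full.length : Int) ≤ i + d → ∀ (acc : List String),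
    (PySem.List.pyRange i (full.length : Int) n).foldl
      (fun output j =>
        if j = (full.length : Int) then
          output ++ [(PySem.List.pyGet? full j).getD ""]
        else if j + n > (full.length : Int) then
          output ++ [PySem.Str.join "," (PySem.List.slice full (some j) none)]
        else
          output ++ [PySem.Str.join "," (PySem.List.slice full (some j) (some (j + n)))]) acc
      = acc ++ chunksJ n.toNat (full.drop i.toNat) := by
  intro d
  induction d with
  | zero =>
    intro i hi hd acc
    rw [PySem.List.pyRange_of_pos _ _ (by omega : (0:Int) < n)]
    rw [if_neg (by omega : ¬ i < (full.length : Int))]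
    rw [List.drop_eq_nil_of_le (by omega : full.length ≤ i.toNat)]
    simp [chunksJ_nil]
  | succ d ih =>
    intro i hi hd acc
    by_cases hend : (full.length : Int) ≤ i
    · rw [PySem.List.pyRange_of_pos _ _ (by omega : (0:Int) < n)]
      rw [if_neg (by omega : ¬ i < (full.length : Int))]
      rw [List.drop_eq_nil_of_le (by omega : full.length ≤ i.toNat)]
      simp [chunksJ_nil]
    · have hlt : i < (full.length : Int) := by omega
      rw [pyRange_cons_of_pos _ _ (by omega) hlt, List.foldl_cons]
      have hne : full.drop i.toNat ≠ [] := by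
        intro h
        have := List.drop_eq_nil_iff.mp h
        omega
      obtain ⟨x, xs, hxxs⟩ := List.exists_cons_of_ne_nil hne
      have hlen : xs.length = full.length - i.toNat - 1 := by
        have := congrArg List.length hxxs
        simp [List.length_drop] at this
        omega
      obtain ⟨m, hm⟩ : ∃ m, n.toNat = m + 1 := ⟨n.toNat - 1, by omega⟩
      have htake : x :: xs.take (n.toNat - 1) = (full.drop i.toNat).take n.toNat := by
        rw [hxxs, hm]
        simp
      have hdrop : xs.drop (n.toNat - 1) = full.drop (i + n).toNat := by
        have h1 : xs.drop (n.toNat - 1) = (full.drop i.toNat).drop n.toNat := by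
          rw [hxxs, hm]
          simp
        rw [h1, List.drop_drop]
        congr 1
        omega
      have hbody :
          (if i = (full.length : Int) then
            acc ++ [(PySem.List.pyGet? full i).getD ""]
          else if i + n > (full.length : Int) then
            acc ++ [PySem.Str.join "," (PySem.List.slice full (some i) none)]
          else
            acc ++ [PySem.Str.join "," (PySem.List.slice full (some i) (some (i + n)))])
          = acc ++ [PySem.Str.join "," ((full.drop i.toNat).take n.toNat)] := by
        rw [if_neg (by omega : ¬ i = (full.length : Int))]
        by_cases hlast : i + n > (full.length : Int)
        · rw [if_pos hlast, PySem.List.slice_from full hi]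
          have : (full.drop i.toNat).take n.toNat = full.drop i.toNat :=
            List.take_of_length_le (by simp [List.length_drop]; omega)
          rw [this]
        · rw [if_neg hlast, PySem.List.slice_toNat full hi (by omega : (0:Int) ≤ i + n)]
          have heq : (i + n).toNat - i.toNat = n.toNat := by omega
          rw [heq]
      rw [hbody, ih (i + n) (by omega) (by omega)]
      have hchunks : chunksJ n.toNat (full.drop i.toNat)
          = PySem.Str.join "," ((full.drop i.toNat).take n.toNat)
            :: chunksJ n.toNat (full.drop (i + n).toNat) := by
        rw [hxxs, chunksJ_cons, ← hdrop, htake, hxxs]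
      rw [hchunks]
      simp

lemma chunksJ_chunk (n : Int) (hn : 1 ≤ n) (l : List String) (hne : l ≠ []) :
    chunksJ n.toNat l
      = PySem.Str.join "," (l.take n.toNat) :: chunksJ n.toNat (l.drop n.toNat) := by
  obtain ⟨x, xs, rfl⟩ := List.exists_cons_of_ne_nil hne
  obtain ⟨m, hm⟩ : ∃ m, n.toNat = m + 1 := ⟨n.toNat - 1, by omega⟩
  rw [chunksJ_cons, hm]
  simp

-- B's buffer pass: starting from a partially filled buffer (shorter than n), flushing
-- at n and finally flushing the remainder yields exactly the n-chunks of buf ++ l.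
lemma foldB (n : Int) (hn : 1 ≤ n) :
    ∀ (l acc buf : List String), (buf.length : Int) < n →
    (if (l.foldl
          (fun (s : List String × List String) v =>
            if (((s.2 ++ [v]).length : Nat) : Int) = n then
              (s.1 ++ [PySem.Str.join "," (s.2 ++ [v])], ([] : List String))
            else (s.1, s.2 ++ [v]))
          (acc, buf)).2 ≠ [] then
      (l.foldl
          (fun (s : List String × List String) v =>
            if (((s.2 ++ [v]).length : Nat) : Int) = n then
              (s.1 ++ [PySem.Str.join "," (s.2 ++ [v])], ([] : List String))
            else (s.1, s.2 ++ [v]))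
          (acc, buf)).1 ++
        [PySem.Str.join ","
          (l.foldl
            (fun (s : List String × List String) v =>
              if (((s.2 ++ [v]).length : Nat) : Int) = n then
                (s.1 ++ [PySem.Str.join "," (s.2 ++ [v])], ([] : List String))
              else (s.1, s.2 ++ [v]))
            (acc, buf)).2]
    else
      (l.foldl
          (fun (s : List String × List String) v =>
            if (((s.2 ++ [v]).length : Nat) : Int) = n then
              (s.1 ++ [PySem.Str.join "," (s.2 ++ [v])], ([] : List String))
            else (s.1, s.2 ++ [v]))
          (acc, buf)).1)
      = acc ++ chunksJ n.toNat (buf ++ l) := by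
  intro l
  induction l with
  | nil =>
    intro acc buf hb
    simp only [List.foldl_nil, List.append_nil]
    by_cases h : buf = []
    · subst h; simp [chunksJ_nil]
    · obtain ⟨x, xs, rfl⟩ := List.exists_cons_of_ne_nil h
      rw [chunksJ_cons]
      have h1 : xs.take (n.toNat - 1) = xs :=
        List.take_of_length_le (by simp at hb ⊢; omega)
      have h2 : xs.drop (n.toNat - 1) = [] :=
        List.drop_eq_nil_of_le (by simp at hb ⊢; omega)
      rw [h1, h2, chunksJ_nil]
      simp
  | cons v l' ih =>
    intro acc buf hb
    rw [List.foldl_cons]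
    by_cases h : (((buf ++ [v]).length : Nat) : Int) = n
    · rw [if_pos h]
      rw [ih (acc ++ [PySem.Str.join "," (buf ++ [v])]) [] (by simp; omega)]
      have hne : buf ++ v :: l' = (buf ++ [v]) ++ l' := by simp
      rw [hne, chunksJ_chunk n hn ((buf ++ [v]) ++ l') (by simp)]
      have hlen : (buf ++ [v]).length = n.toNat := by omega
      have ht : ((buf ++ [v]) ++ l').take n.toNat = buf ++ [v] := by
        rw [← hlen]; exact List.take_left
      have hd : ((buf ++ [v]) ++ l').drop n.toNat = l' := by
        rw [← hlen]; exact List.drop_left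
      rw [ht, hd]
      simp
    · rw [if_neg h]
      have hb' : (((buf ++ [v]).length : Nat) : Int) < n := by
        simp at h ⊢; omega
      rw [ih acc (buf ++ [v]) hb']
      simp

lemma pre_to_eq (vidId : List String) (maxLen : Int)
    (h : maxLen ≤ -7 ∨ 7 ≤ maxLen) :
    createIdStr vidId maxLen = createIdStr_alt vidId maxLen := by
  simp only [createIdStr, createIdStr_alt]
  rcases h with h | h
  · -- negative batch size: A's range has a negative step (empty), B batches nothing
    have hn : pyRound12 maxLen ≤ -1 := pyRound12_neg maxLen h
    have hA : PySem.List.pyRange 0 (vidId.length : Int) (pyRound12 maxLen) = [] := by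
      simp only [PySem.List.pyRange]
      rw [if_neg (by omega : ¬ pyRound12 maxLen = 0)]
      rw [if_neg (by omega : ¬ (0:Int) < pyRound12 maxLen),
          if_neg (by omega : ¬ (vidId.length : Int) < 0)]
      simp
    rw [hA, if_pos (by omega : pyRound12 maxLen ≤ 0)]
    simp
  · have hn : 1 ≤ pyRound12 maxLen := pyRound12_pos maxLen h
    rw [foldA vidId (pyRound12 maxLen) hn vidId.length 0 (by omega) (by omega) []]
    rw [if_neg (by omega : ¬ pyRound12 maxLen ≤ 0)]
    have hfb := foldB (pyRound12 maxLen) hn vidId [] [] (by simp; omega)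
    simp only [List.nil_append, List.drop_zero, Int.toNat_zero] at hfb ⊢
    exact hfb.symm

-- ===== VERDICT (by name: the statement is the Claim_ definition above) =====
theorem createIdStr_spec : Claim_equal_createIdStr := by
  intro vidId maxLen _ hpre
  exact pre_to_eq vidId maxLen hpre
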